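-- pv_equiv track=rewrite | github.com/Gimminu/groq-local-project-onboarding-agent | app/index_v2/content_hints.py | _common_prefix_tokens
-- ===== SOURCE A (Python) =====
-- from typing import Iterable, Sequence
--
-- def _common_prefix_tokens(labels: Sequence[Sequence[str]]) -> list[str]:
--     if not labels:
--         return []
--     prefix = list(labels[0])
--     for label in labels[1:]:
--         limit = min(len(prefix), len(label))
--         index = 0
--         while index < limit and prefix[index] == label[index]:
--             index += 1
--         prefix = prefix[:index]
--         if not prefix:
--             return []
--     return prefix
-- ===== SOURCE B (Python) =====
-- from typing import Iterable, Sequence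
--
-- def _common_prefix_tokens(labels: Sequence[Sequence[str]]) -> list[str]:
--     result = []
--     for column in zip(*labels):
--         first = column[0]
--         if all(tok == first for tok in column):
--             result.append(first)
--         else:
--             break
--     return result
-- ===== Notes on version B (the rewrite author's own statement) =====
-- stated objective: idiomatic
-- what changed: B transposes the labels with zip(*labels) and scans column-by-column across all labels at once, instead of A's row-by-row shrinking of a prefix with an inner while loop.
import Mathlib
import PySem

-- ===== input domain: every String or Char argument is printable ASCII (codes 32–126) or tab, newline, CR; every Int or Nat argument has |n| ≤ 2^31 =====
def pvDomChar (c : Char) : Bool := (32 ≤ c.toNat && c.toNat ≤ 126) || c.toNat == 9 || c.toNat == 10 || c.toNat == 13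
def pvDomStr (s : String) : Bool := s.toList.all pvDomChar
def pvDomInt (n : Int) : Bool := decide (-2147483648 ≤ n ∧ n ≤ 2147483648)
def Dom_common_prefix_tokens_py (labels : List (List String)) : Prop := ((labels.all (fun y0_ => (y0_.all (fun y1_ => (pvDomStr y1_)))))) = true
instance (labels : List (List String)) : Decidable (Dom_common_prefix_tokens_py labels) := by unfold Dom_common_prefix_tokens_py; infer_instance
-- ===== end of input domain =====

-- B scans column-by-column over the transposed labels (zip(*labels)) instead of A's
-- row-by-row prefix shrinking; same cost, more idiomatic (objective: idiomatic).

-- ===== PORT A =====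
-- the while loop: longest common prefix of two token lists (prefix[:index])
def pvLcp2 : List String → List String → List String
  | a :: p, b :: l => if a == b then a :: pvLcp2 p l else []
  | _, _ => []

-- the for loop over labels[1:], with the early 'return []'
def pvALoop : List String → List (List String) → List String
  | prefix_, [] => prefix_
  | prefix_, label :: rest =>
      let p := pvLcp2 prefix_ label
      if p = [] then [] else pvALoop p rest

def common_prefix_tokens_py (labels : List (List String)) : List String :=
  match labels with
  | [] => []
  | first :: rest => pvALoop first rest

-- ===== PORT B =====
-- zip(*labels): columns, truncated at the shortest label
def pvZipCols : List (List String) → List (List String)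
  | [] => []
  | l :: ls =>
      if h : l ≠ [] ∧ ∀ l' ∈ ls, l' ≠ [] then
        (l.headD "" :: ls.map (fun l' => l'.headD "")) :: pvZipCols (l.tail :: ls.map List.tail)
      else []
termination_by ls => (match ls with | [] => 0 | l :: _ => l.length)
decreasing_by
  cases l with
  | nil => exact absurd rfl h.1
  | cons a t => simp [List.tail]

-- the for loop over columns with the break on a mismatching column
def pvBLoop : List (List String) → List String
  | [] => []
  | col :: rest =>
      match col with
      | [] => []
      | f :: _ => if col.all (fun t => t == f) then f :: pvBLoop rest else []

def common_prefix_tokens_py_alt (labels : List (List String)) : List String :=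
  pvBLoop (pvZipCols labels)

-- ===== PRECONDITION & SPEC =====
def Spec_common_prefix_tokens_py (labels : List (List String)) (out : List String) : Prop := out = common_prefix_tokens_py_alt labels
instance (labels : List (List String)) (out : List String) : Decidable (Spec_common_prefix_tokens_py labels out) := by unfold Spec_common_prefix_tokens_py; infer_instance

-- ===== CLAIM (what is proved, stated in full; the proofs are below) =====
def Claim_equal_common_prefix_tokens_py : Prop := ∀ (labels : List (List String)), Dom_common_prefix_tokens_py labels → Spec_common_prefix_tokens_py labels (common_prefix_tokens_py labels)

-- ===== LEMMAS AND PROOFS =====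

theorem pvLcp2_nil (l : List String) : pvLcp2 [] l = [] := by
  cases l <;> rfl

theorem pvALoop_nil (rest : List (List String)) : pvALoop [] rest = [] := by
  cases rest with
  | nil => rfl
  | cons l r => simp [pvALoop, pvLcp2_nil]

-- all labels start with token a: one column of a's peels off
theorem pvALoop_heads (a : String) (rest : List (List String)) (p' : List String)
    (h : ∀ l ∈ rest, ∃ t, l = a :: t) :
    pvALoop (a :: p') rest = a :: pvALoop p' (rest.map List.tail) := by
  induction rest generalizing p' with
  | nil => rfl
  | cons l rest' ih =>
    obtain ⟨t, rfl⟩ := h l (List.mem_cons_self ..)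
    have hrest' : ∀ l' ∈ rest', ∃ t', l' = a :: t' := fun l' hm => h l' (List.mem_cons_of_mem _ hm)
    by_cases hq : pvLcp2 p' t = []
    · simp [pvALoop, pvLcp2, hq, ih _ hrest', pvALoop_nil]
    · simp [pvALoop, pvLcp2, hq, ih _ hrest']

-- some label does not start with a: result is empty
theorem pvALoop_bad (a : String) (rest : List (List String)) (p' : List String)
    (h : ∃ l ∈ rest, ¬ ∃ t, l = a :: t) :
    pvALoop (a :: p') rest = [] := by
  induction rest generalizing p' with
  | nil => obtain ⟨l, hm, _⟩ := h; exact absurd hm (List.not_mem_nil)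
  | cons l rest' ih =>
    obtain ⟨l₀, hm, hbad⟩ := h
    rcases List.mem_cons.mp hm with rfl | hm'
    · cases l₀ with
      | nil => simp [pvALoop, pvLcp2]
      | cons b t =>
        have hba : ¬ (a == b) := by
          simp only [beq_iff_eq]
          intro hab; exact hbad ⟨t, by rw [hab]⟩
        simp [pvALoop, pvLcp2, hba]
    · cases l with
      | nil => simp [pvALoop, pvLcp2]
      | cons b t =>
        by_cases hab : a == b
        · simp only [beq_iff_eq] at hab
          subst hab
          by_cases hq : pvLcp2 p' t = []
          · simp [pvALoop, pvLcp2, hq, ih _ ⟨l₀, hm', hbad⟩]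
          · simp [pvALoop, pvLcp2, ih _ ⟨l₀, hm', hbad⟩]
        · simp [pvALoop, pvLcp2, hab]

theorem pvMain (p : List String) (rest : List (List String)) :
    pvALoop p rest = pvBLoop (pvZipCols (p :: rest)) := by
  induction p generalizing rest with
  | nil =>
    rw [pvALoop_nil, pvZipCols.eq_2, dif_neg (by simp)]
    rfl
  | cons a p' ih =>
    by_cases hall : ∀ l ∈ rest, ∃ t, l = a :: t
    · have hne : (a :: p') ≠ [] ∧ ∀ l' ∈ rest, l' ≠ [] := by
        refine ⟨by simp, fun l' hm => ?_⟩
        obtain ⟨t, rfl⟩ := hall l' hm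
        simp
      rw [pvZipCols.eq_2, dif_pos hne]
      have hheads : rest.map (fun l' => l'.headD "") = rest.map (fun _ => a) := by
        apply List.map_congr_left
        intro l hm
        obtain ⟨t, rfl⟩ := hall l hm
        rfl
      have hallcol : ((a :: p').headD "" :: rest.map (fun l' => l'.headD "")).all (fun t => t == a) = true := by
        rw [hheads]
        simp [List.all_eq_true]
      rw [pvBLoop]
      simp only [List.headD] at hallcol ⊢
      rw [hallcol]
      simp only [if_true]
      rw [pvALoop_heads a rest p' hall]
      simp only [List.tail_cons]
      rw [ih]
    · push_neg at hall
      rw [pvALoop_bad a rest p' (by push_neg; exact hall)]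
      by_cases hne : ∀ l' ∈ rest, l' ≠ []
      · -- all labels nonempty, but some head differs from a
        rw [pvZipCols.eq_2, dif_pos ⟨by simp, hne⟩, pvBLoop]
        obtain ⟨l₀, hm, hbad⟩ := hall
        have hcol : ¬ (((a :: p').headD "" :: rest.map (fun l' => l'.headD "")).all (fun t => t == (a :: p').headD "") = true) := by
          simp only [List.all_eq_true]
          intro hforall
          cases hl₀ : l₀ with
          | nil => exact absurd hl₀ (hne _ hm)
          | cons b t =>
            subst hl₀
            have hb := hforall b (List.mem_cons_of_mem _ (List.mem_map.mpr ⟨b :: t, hm, rfl⟩))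
            simp only [List.headD_cons, beq_iff_eq] at hb
            exact hbad t (by rw [hb])
        simp only [if_neg hcol]
      · -- some label empty: zip truncates to no columns
        push_neg at hne
        obtain ⟨l₀, hm, hl₀⟩ := hne
        rw [pvZipCols.eq_2, dif_neg (by rintro ⟨-, h2⟩; exact h2 l₀ hm hl₀)]
        rfl

-- ===== VERDICT (by name: the statement is the Claim_ definition above) =====
theorem common_prefix_tokens_py_spec : Claim_equal_common_prefix_tokens_py := by
  intro labels _
  unfold Spec_common_prefix_tokens_py common_prefix_tokens_py common_prefix_tokens_py_alt
  cases labels with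
  | nil => simp [pvZipCols, pvBLoop]
  | cons first rest => exact pvMain first rest
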